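-- pv_equiv track=rewrite | github.com/pars3c/hacker-rank | aktis/test3.py | solution
-- ===== SOURCE A (Python) =====
-- def solution(S):
--     # write your code in Python 3.6
--     my_list = sorted(list(S))
--
--     if len(my_list) <= 3:
--             return int(len(S))
--     else:
--         for i in range(len(my_list)):
--             try:
--                 del my_list[i+1]
--             except:
--                 break
--
--         S = (''.join(my_list))
--         return int(len(S))
-- ===== SOURCE B (Python) =====
-- def solution(S):
--     # closed form: sorting doesn't change length; the deletion loop keeps ceil(n/2) elements
--     n = len(S)
--     return n if n <= 3 else (n + 1) // 2
-- ===== Notes on version B (the rewrite author's own statement) =====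
-- stated objective: faster
-- what changed: Replaced sort plus quadratic element-deletion loop by the closed form n if n<=3 else (n+1)//2 computed from len(S) alone.
import Mathlib
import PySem

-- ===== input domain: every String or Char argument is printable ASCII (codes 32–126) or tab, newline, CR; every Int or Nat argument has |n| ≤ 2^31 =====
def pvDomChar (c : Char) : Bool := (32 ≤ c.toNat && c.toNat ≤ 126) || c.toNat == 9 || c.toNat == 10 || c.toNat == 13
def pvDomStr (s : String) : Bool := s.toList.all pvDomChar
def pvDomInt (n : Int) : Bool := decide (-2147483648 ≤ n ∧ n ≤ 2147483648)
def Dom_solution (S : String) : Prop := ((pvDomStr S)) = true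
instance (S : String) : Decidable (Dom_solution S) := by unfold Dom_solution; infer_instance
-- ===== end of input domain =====

-- B replaces A's sort plus element-deletion loop by the closed form n if n ≤ 3 else (n+1)//2 on len(S) (objective: faster).


-- ===== PORT A =====
-- the for-loop 'for i in range(n): try: del my_list[i+1] except: break'; k = remaining iterations
def solutionLoop : Nat → Nat → List Char → List Char
  | 0, _, l => l
  | k+1, i, l =>
    match PySem.List.pop? l ((i : Int) + 1) with
    | none => l                                  -- IndexError → break
    | some (_, l') => solutionLoop k (i+1) l'

def solution (S : String) : Int :=
  let myList := PySem.List.sorted S.toList (fun c => c) false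
  if myList.length ≤ 3 then PySem.Str.len S
  else
    let final := solutionLoop myList.length 0 myList
    -- S = ''.join(my_list); return int(len(S))
    PySem.Str.len (String.ofList final)

-- ===== PORT B =====
def solution_alt (S : String) : Int :=
  let n := PySem.Str.len S
  if n ≤ 3 then n else PySem.Int.floordiv (n + 1) 2

-- ===== PRECONDITION & SPEC =====
def Spec_solution (S : String) (out : Int) : Prop := out = solution_alt S
instance (S : String) (out : Int) : Decidable (Spec_solution S out) := by unfold Spec_solution; infer_instance

-- ===== CLAIM (what is proved, stated in full; the proofs are below) =====
def Claim_equal_solution : Prop := ∀ (S : String), Dom_solution S → Spec_solution S (solution S)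

-- ===== LEMMAS AND PROOFS =====
lemma solutionLoop_length (k : Nat) : ∀ (i : Nat) (l : List Char), l.length ≤ i + 2*k →
    (solutionLoop k i l).length =
      if l.length ≤ i + 1 then l.length else l.length - (l.length - i)/2 := by
  induction k with
  | zero =>
    intro i l h
    simp only [solutionLoop]
    rw [if_pos (by omega)]
  | succ k ih =>
    intro i l h
    by_cases hlt : i + 1 < l.length
    · have hpop : PySem.List.pop? l ((i : Int) + 1) = some (l[i+1], l.eraseIdx (i+1)) := by
        have := PySem.List.pop?_natCast l (i+1) hlt
        simpa using this
      simp only [solutionLoop, hpop]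
      rw [ih (i+1) (l.eraseIdx (i+1)) (by simp [List.length_eraseIdx, hlt]; omega)]
      simp only [List.length_eraseIdx, hlt, if_pos]
      split_ifs <;> omega
    · have hpop : PySem.List.pop? l ((i : Int) + 1) = none := by
        simp only [PySem.List.pop?, PySem.List.pyIdx?]
        rw [if_pos (by omega), if_neg (by omega)]
        rfl
      simp only [solutionLoop, hpop]
      rw [if_pos (by omega)]

-- ===== VERDICT (by name: the statement is the Claim_ definition above) =====
theorem solution_spec : Claim_equal_solution := by
  intro S _
  unfold Spec_solution solution solution_alt
  simp only [PySem.List.length_sorted, PySem.Str.len, String.toList_ofList]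
  by_cases h3 : S.toList.length ≤ 3
  · rw [if_pos h3, if_pos (by exact_mod_cast h3)]
  · rw [if_neg h3, if_neg (by exact_mod_cast h3)]
    have hlen := solutionLoop_length S.toList.length 0
      (PySem.List.sorted S.toList (fun c => c) false)
      (by simp only [PySem.List.length_sorted]; omega)
    simp only [PySem.List.length_sorted] at hlen
    rw [if_neg (by omega)] at hlen
    rw [hlen, PySem.Int.floordiv,
      show ((S.toList.length : Int) + 1) = ((S.toList.length + 1 : Nat) : Int) by push_cast; ring_nf,
      show ∀ m : Nat, Int.fdiv (m : Int) 2 = ((m / 2 : Nat) : Int) from fun m => by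
        rw [Int.fdiv_eq_ediv]; simp]
    exact_mod_cast congrArg (Nat.cast : Nat → Int)
      (show S.toList.length - (S.toList.length - 0) / 2 = (S.toList.length + 1) / 2 by omega)
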